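-- pv_equiv track=rewrite | github.com/notfornothing/DuoKai | tile_windows.py | compute_grid_positions
-- ===== SOURCE A (Python) =====
-- def compute_grid_positions(screen_w, screen_h, offset_x, offset_y, columns, rows, count):
--     # 按列和行均匀分配像素，余数从左/上开始逐列逐行分配，避免缝隙
--     base_w = screen_w // columns
--     rem_w = screen_w % columns
--     col_widths = [base_w + (1 if i < rem_w else 0) for i in range(columns)]
--     col_x = [offset_x]
--     for i in range(1, columns):
--         col_x.append(col_x[i - 1] + col_widths[i - 1])
--
--     base_h = screen_h // rows
--     rem_h = screen_h % rows
--     row_heights = [base_h + (1 if i < rem_h else 0) for i in range(rows)]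
--     row_y = [offset_y]
--     for i in range(1, rows):
--         row_y.append(row_y[i - 1] + row_heights[i - 1])
--
--     rects = []
--     for idx in range(count):
--         r = idx // columns
--         c = idx % columns
--         if r >= rows:
--             break
--         x = col_x[c]
--         y = row_y[r]
--         w = col_widths[c]
--         h = row_heights[r]
--         rects.append((x, y, w, h))
--     return rects
-- ===== SOURCE B (Python) =====
-- def compute_grid_positions(screen_w, screen_h, offset_x, offset_y, columns, rows, count):
--     # Same values via per-cell closed-form arithmetic; no prefix tables.
--     base_w, rem_w = divmod(screen_w, columns)
--     base_h, rem_h = divmod(screen_h, rows)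
--     rects = []
--     for idx in range(count):
--         r, c = divmod(idx, columns)
--         if r >= rows:
--             break
--         w = base_w + (1 if c < rem_w else 0)
--         x = offset_x + c * base_w + min(c, rem_w)
--         h = base_h + (1 if r < rem_h else 0)
--         y = offset_y + r * base_h + min(r, rem_h)
--         rects.append((x, y, w, h))
--     return rects
-- ===== Notes on version B (the rewrite author's own statement) =====
-- stated objective: simpler
-- what changed: Dropped A's four precomputed prefix tables (col_widths, col_x, row_heights, row_y) and their build loops; B computes each rectangle's x, y, w, h by closed-form arithmetic (c*base_w + min(c, rem_w), etc.) directly inside the single loop over range(count).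
import Mathlib
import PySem

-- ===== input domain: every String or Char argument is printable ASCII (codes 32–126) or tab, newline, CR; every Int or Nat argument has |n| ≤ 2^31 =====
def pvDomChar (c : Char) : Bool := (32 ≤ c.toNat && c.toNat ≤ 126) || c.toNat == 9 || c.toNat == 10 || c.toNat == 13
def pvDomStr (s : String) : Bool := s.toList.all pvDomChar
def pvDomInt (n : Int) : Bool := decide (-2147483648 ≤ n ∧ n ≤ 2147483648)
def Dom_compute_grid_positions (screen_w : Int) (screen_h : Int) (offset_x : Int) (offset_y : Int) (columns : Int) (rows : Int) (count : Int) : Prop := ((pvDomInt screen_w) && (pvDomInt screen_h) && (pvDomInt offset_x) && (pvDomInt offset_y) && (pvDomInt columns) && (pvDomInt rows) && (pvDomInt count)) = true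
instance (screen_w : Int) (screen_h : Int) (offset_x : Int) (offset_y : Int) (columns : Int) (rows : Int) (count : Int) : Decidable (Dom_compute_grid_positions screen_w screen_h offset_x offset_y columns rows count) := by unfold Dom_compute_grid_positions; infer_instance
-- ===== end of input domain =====

-- B drops A's four precomputed prefix tables and computes each rectangle by closed-form
-- arithmetic inside the single loop (objective: simpler).

-- ===== PORT A =====
-- the 'for idx in range(count): … if r >= rows: break …' loop of A
-- (range(count) is lazy in Python and the loop can break early, so it is ported as
-- index recursion 'idx = 0, 1, …' with an early stop, not over a materialised list)
def pvLoopA (columns rows : Int) (col_x col_widths row_y row_heights : List (Int))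
    (count idx : Int) (rects : List (Int × Int × Int × Int)) : List (Int × Int × Int × Int) :=
  if idx < count then
    let r := PySem.Int.floordiv idx columns
    let c := PySem.Int.mod idx columns
    if r ≥ rows then rects
    else
      let x := PySem.List.pyGetD col_x c 0
      let y := PySem.List.pyGetD row_y r 0
      let w := PySem.List.pyGetD col_widths c 0
      let h := PySem.List.pyGetD row_heights r 0
      pvLoopA columns rows col_x col_widths row_y row_heights count (idx + 1) (rects ++ [(x, y, w, h)])
  else rects
termination_by (count - idx).toNat
decreasing_by omega

def compute_grid_positions (screen_w : Int) (screen_h : Int) (offset_x : Int) (offset_y : Int) (columns : Int) (rows : Int) (count : Int) : List (Int × Int × Int × Int) :=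
  let base_w := PySem.Int.floordiv screen_w columns
  let rem_w := PySem.Int.mod screen_w columns
  let col_widths := (PySem.List.pyRange 0 columns 1).map (fun i => base_w + (if i < rem_w then (1:Int) else 0))
  let col_x := (PySem.List.pyRange 1 columns 1).foldl
      (fun acc i => acc ++ [PySem.List.pyGetD acc (i - 1) 0 + PySem.List.pyGetD col_widths (i - 1) 0]) [offset_x]
  let base_h := PySem.Int.floordiv screen_h rows
  let rem_h := PySem.Int.mod screen_h rows
  let row_heights := (PySem.List.pyRange 0 rows 1).map (fun i => base_h + (if i < rem_h then (1:Int) else 0))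
  let row_y := (PySem.List.pyRange 1 rows 1).foldl
      (fun acc i => acc ++ [PySem.List.pyGetD acc (i - 1) 0 + PySem.List.pyGetD row_heights (i - 1) 0]) [offset_y]
  pvLoopA columns rows col_x col_widths row_y row_heights count 0 []

-- ===== PORT B =====
-- the single loop of B: per-cell closed-form arithmetic, no tables (lazy range, early stop)
def pvLoopB (offset_x offset_y base_w rem_w base_h rem_h columns rows : Int)
    (count idx : Int) (rects : List (Int × Int × Int × Int)) : List (Int × Int × Int × Int) :=
  if idx < count then
    let r := PySem.Int.floordiv idx columns
    let c := PySem.Int.mod idx columns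
    if r ≥ rows then rects
    else
      let w := base_w + (if c < rem_w then (1:Int) else 0)
      let x := offset_x + c * base_w + min c rem_w
      let h := base_h + (if r < rem_h then (1:Int) else 0)
      let y := offset_y + r * base_h + min r rem_h
      pvLoopB offset_x offset_y base_w rem_w base_h rem_h columns rows count (idx + 1) (rects ++ [(x, y, w, h)])
  else rects
termination_by (count - idx).toNat
decreasing_by omega

def compute_grid_positions_alt (screen_w : Int) (screen_h : Int) (offset_x : Int) (offset_y : Int) (columns : Int) (rows : Int) (count : Int) : List (Int × Int × Int × Int) :=
  let base_w := PySem.Int.floordiv screen_w columns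
  let rem_w := PySem.Int.mod screen_w columns
  let base_h := PySem.Int.floordiv screen_h rows
  let rem_h := PySem.Int.mod screen_h rows
  pvLoopB offset_x offset_y base_w rem_w base_h rem_h columns rows count 0 []

-- ===== PRECONDITION & SPEC =====
-- Pre_ excludes exactly the inputs where A raises: columns = 0 or rows = 0 (ZeroDivisionError),
-- and columns < 0 with rows > 0 and count > 0 (IndexError on the empty col_widths list).
def Pre_compute_grid_positions (screen_w : Int) (screen_h : Int) (offset_x : Int) (offset_y : Int) (columns : Int) (rows : Int) (count : Int) : Prop :=
  columns ≠ 0 ∧ rows ≠ 0 ∧ ¬(columns < 0 ∧ 0 < rows ∧ 0 < count)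
instance (screen_w : Int) (screen_h : Int) (offset_x : Int) (offset_y : Int) (columns : Int) (rows : Int) (count : Int) : Decidable (Pre_compute_grid_positions screen_w screen_h offset_x offset_y columns rows count) := by unfold Pre_compute_grid_positions; infer_instance

def pvWitness_compute_grid_positions : Int × Int × Int × Int × Int × Int × Int := (100, 90, 5, 7, 3, 2, 6)

def Spec_compute_grid_positions (screen_w : Int) (screen_h : Int) (offset_x : Int) (offset_y : Int) (columns : Int) (rows : Int) (count : Int) (out : List (Int × Int × Int × Int)) : Prop := out = compute_grid_positions_alt screen_w screen_h offset_x offset_y columns rows count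
instance (screen_w : Int) (screen_h : Int) (offset_x : Int) (offset_y : Int) (columns : Int) (rows : Int) (count : Int) (out : List (Int × Int × Int × Int)) : Decidable (Spec_compute_grid_positions screen_w screen_h offset_x offset_y columns rows count out) := by unfold Spec_compute_grid_positions; infer_instance

-- ===== CLAIM (what is proved, stated in full; the proofs are below) =====
def Claim_equal_compute_grid_positions : Prop := ∀ (screen_w : Int) (screen_h : Int) (offset_x : Int) (offset_y : Int) (columns : Int) (rows : Int) (count : Int), Dom_compute_grid_positions screen_w screen_h offset_x offset_y columns rows count → Pre_compute_grid_positions screen_w screen_h offset_x offset_y columns rows count → Spec_compute_grid_positions screen_w screen_h offset_x offset_y columns rows count (compute_grid_positions screen_w screen_h offset_x offset_y columns rows count)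

-- ===== LEMMAS AND PROOFS =====

-- A's prefix-table build (col_x / row_y) equals the closed-form map.
theorem pvBuild_eq_nat (start bw rw_ N : Int) (hrw : 0 ≤ rw_) :
    ∀ m : Nat, 1 ≤ m → (m : Int) ≤ N →
    (PySem.List.pyRange 1 (m : Int) 1).foldl
      (fun acc i => acc ++ [PySem.List.pyGetD acc (i - 1) 0 +
        PySem.List.pyGetD ((PySem.List.pyRange 0 N 1).map (fun j => bw + (if j < rw_ then (1:Int) else 0))) (i - 1) 0]) [start]
    = (List.range m).map (fun (k : Nat) => start + (k : Int) * bw + min ((k : Nat) : Int) rw_) := by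
  intro m
  induction m with
  | zero => intro h; omega
  | succ n ih =>
    intro _ hle
    by_cases hn : 1 ≤ n
    · have h1 : (1 : Int) ≤ (n : Int) := by exact_mod_cast hn
      have hsplit : PySem.List.pyRange 1 ((n : Int) + 1) 1
          = PySem.List.pyRange 1 (n : Int) 1 ++ [(n : Int)] :=
        PySem.List.pyRange_one_succ_right h1
      have hcast : ((n + 1 : Nat) : Int) = (n : Int) + 1 := by push_cast; ring
      rw [hcast, hsplit, List.foldl_append, ih hn (by omega)]
      simp only [List.foldl]
      have hidx : ((n : Int) - 1) = ((n - 1 : Nat) : Int) := by omega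
      have hget1 : PySem.List.pyGetD ((List.range n).map (fun (k : Nat) => start + (k : Int) * bw + min ((k : Nat) : Int) rw_)) ((n : Int) - 1) 0
          = start + ((n - 1 : Nat) : Int) * bw + min ((n - 1 : Nat) : Int) rw_ := by
        rw [hidx, PySem.List.pyGetD_natCast]
        rw [List.getD_eq_getElem _ _ (by simp; omega)]
        simp [List.getElem_map]
      have hget2 : PySem.List.pyGetD ((PySem.List.pyRange 0 N 1).map (fun j => bw + (if j < rw_ then (1:Int) else 0))) ((n : Int) - 1) 0
          = bw + (if ((n : Int) - 1) < rw_ then (1:Int) else 0) := by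
        exact PySem.List.pyGetD_map_pyRange_of_nonneg _ N _ 0 (by omega) (by omega)
      rw [hget1, hget2, List.range_succ, List.map_append]
      simp only [List.map]
      congr 1
      have hc1 : ((n - 1 : Nat) : Int) = (n : Int) - 1 := by omega
      rw [hc1]
      by_cases hlt : (n : Int) - 1 < rw_
      · simp only [if_pos hlt]
        have hm1 : min ((n : Int) - 1) rw_ = (n : Int) - 1 := by omega
        have hm2 : min (n : Int) rw_ = (n : Int) := by omega
        rw [hm1, hm2]; congr 1; ring
      · simp only [if_neg hlt]
        have hm1 : min ((n : Int) - 1) rw_ = rw_ := by omega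
        have hm2 : min (n : Int) rw_ = rw_ := by omega
        rw [hm1, hm2]; congr 1; ring
    · -- n = 0 : range(1, 1) is empty, the table is the single start entry
      have hn0 : n = 0 := by omega
      subst hn0
      rw [show ((0 + 1 : Nat) : Int) = 1 by norm_num,
        show PySem.List.pyRange 1 1 1 = [] from PySem.List.pyRange_one_eq_nil (le_refl 1)]
      have hm0 : min (0 : Int) rw_ = 0 := by omega
      simp [List.range_succ, hm0]

-- the same, with an Int-valued upper bound (as it appears in the port)
theorem pvBuild_eq (start bw rw_ N M : Int) (hrw : 0 ≤ rw_) (h1 : 1 ≤ M) (hMN : M ≤ N) :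
    (PySem.List.pyRange 1 M 1).foldl
      (fun acc i => acc ++ [PySem.List.pyGetD acc (i - 1) 0 +
        PySem.List.pyGetD ((PySem.List.pyRange 0 N 1).map (fun j => bw + (if j < rw_ then (1:Int) else 0))) (i - 1) 0]) [start]
    = (List.range M.toNat).map (fun (k : Nat) => start + (k : Int) * bw + min ((k : Nat) : Int) rw_) := by
  have hM : M = ((M.toNat : Nat) : Int) := by omega
  rw [hM]
  rw [Int.toNat_natCast]
  exact pvBuild_eq_nat start bw rw_ N hrw M.toNat (by omega) (by omega)

-- indexing the closed-form table
theorem pvGetD_table (start bw rw_ : Int) (n : Nat) (c : Int) (h0 : 0 ≤ c) (hc : c < (n : Int)) :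
    PySem.List.pyGetD ((List.range n).map (fun (k : Nat) => start + (k : Int) * bw + min ((k : Nat) : Int) rw_)) c 0
    = start + c * bw + min c rw_ := by
  have hcast : c = ((c.toNat : Nat) : Int) := by omega
  rw [hcast, PySem.List.pyGetD_natCast]
  rw [List.getD_eq_getElem _ _ (by simp; omega)]
  simp [List.getElem_map]

theorem pvFloordiv_nonneg (i b : Int) (h0 : 0 ≤ i) (hb : 0 < b) : 0 ≤ PySem.Int.floordiv i b := by
  rw [PySem.Int.floordiv_eq_ediv_of_pos hb]
  exact Int.ediv_nonneg h0 (le_of_lt hb)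

-- the two loops agree whenever columns > 0, the tables are pointwise the closed forms,
-- and every remaining index is nonnegative
theorem pvLoop_eq (columns rows base_w rem_w base_h rem_h offset_x offset_y : Int)
    (col_x col_widths row_y row_heights : List Int)
    (hc : 0 < columns)
    (hx : ∀ c : Int, 0 ≤ c → c < columns → PySem.List.pyGetD col_x c 0 = offset_x + c * base_w + min c rem_w)
    (hw : ∀ c : Int, 0 ≤ c → c < columns → PySem.List.pyGetD col_widths c 0 = base_w + (if c < rem_w then (1:Int) else 0))
    (hy : ∀ r : Int, 0 ≤ r → r < rows → PySem.List.pyGetD row_y r 0 = offset_y + r * base_h + min r rem_h)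
    (hh : ∀ r : Int, 0 ≤ r → r < rows → PySem.List.pyGetD row_heights r 0 = base_h + (if r < rem_h then (1:Int) else 0)) :
    ∀ (fuel : Nat) (count idx : Int), 0 ≤ idx → fuel = (count - idx).toNat → ∀ acc,
    pvLoopA columns rows col_x col_widths row_y row_heights count idx acc
    = pvLoopB offset_x offset_y base_w rem_w base_h rem_h columns rows count idx acc := by
  intro fuel
  induction fuel with
  | zero =>
    intro count idx h0 hf acc
    rw [pvLoopA, pvLoopB, if_neg (by omega), if_neg (by omega)]
  | succ n ih =>
    intro count idx h0 hf acc
    by_cases hlt : idx < count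
    case neg => rw [pvLoopA, pvLoopB, if_neg hlt, if_neg hlt]
    case pos =>
      have hr0 : 0 ≤ PySem.Int.floordiv idx columns := pvFloordiv_nonneg idx columns h0 hc
      have hcm0 : 0 ≤ PySem.Int.mod idx columns := PySem.Int.mod_nonneg idx hc
      have hcml : PySem.Int.mod idx columns < columns := PySem.Int.mod_lt idx hc
      rw [pvLoopA, pvLoopB, if_pos hlt, if_pos hlt]
      simp only []
      by_cases hbrk : PySem.Int.floordiv idx columns ≥ rows
      · rw [if_pos hbrk, if_pos hbrk]
      · have hrlt : PySem.Int.floordiv idx columns < rows := by omega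
        rw [if_neg hbrk, if_neg hbrk]
        rw [hx _ hcm0 hcml, hw _ hcm0 hcml, hy _ hr0 hrlt, hh _ hr0 hrlt]
        exact ih count (idx + 1) (by omega) (by omega) _

-- ===== VERDICT (by name: the statement is the Claim_ definition above) =====
theorem compute_grid_positions_spec : Claim_equal_compute_grid_positions := by
  intro screen_w screen_h offset_x offset_y columns rows count _ hpre
  obtain ⟨hc0, hr0, hno⟩ := hpre
  unfold Spec_compute_grid_positions compute_grid_positions compute_grid_positions_alt
  simp only []
  by_cases hcpos : 0 < columns
  · -- main case: columns > 0, rows ≠ 0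
      have hrw0 : 0 ≤ PySem.Int.mod screen_w columns := PySem.Int.mod_nonneg screen_w hcpos
      have hxeq := pvBuild_eq offset_x (PySem.Int.floordiv screen_w columns) (PySem.Int.mod screen_w columns) columns columns hrw0 (by omega) (le_refl columns)
      have hx : ∀ c : Int, 0 ≤ c → c < columns → PySem.List.pyGetD
          ((PySem.List.pyRange 1 columns 1).foldl
          (fun acc i => acc ++ [PySem.List.pyGetD acc (i - 1) 0 +
            PySem.List.pyGetD ((PySem.List.pyRange 0 columns 1).map (fun j => PySem.Int.floordiv screen_w columns + (if j < PySem.Int.mod screen_w columns then (1:Int) else 0))) (i - 1) 0]) [offset_x]) c 0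
          = offset_x + c * PySem.Int.floordiv screen_w columns + min c (PySem.Int.mod screen_w columns) := by
        intro c h0 hcl
        rw [hxeq]
        exact pvGetD_table _ _ _ columns.toNat c h0 (by omega)
      have hw : ∀ c : Int, 0 ≤ c → c < columns → PySem.List.pyGetD
          ((PySem.List.pyRange 0 columns 1).map (fun j => PySem.Int.floordiv screen_w columns + (if j < PySem.Int.mod screen_w columns then (1:Int) else 0))) c 0
          = PySem.Int.floordiv screen_w columns + (if c < PySem.Int.mod screen_w columns then (1:Int) else 0) := by
        intro c h0 hcl
        exact PySem.List.pyGetD_map_pyRange_of_nonneg _ columns c 0 h0 hcl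
      by_cases hrpos : 0 < rows
      · have hrh0 : 0 ≤ PySem.Int.mod screen_h rows := PySem.Int.mod_nonneg screen_h hrpos
        have hyeq := pvBuild_eq offset_y (PySem.Int.floordiv screen_h rows) (PySem.Int.mod screen_h rows) rows rows hrh0 (by omega) (le_refl rows)
        refine pvLoop_eq _ _ _ _ _ _ _ _ _ _ _ _ hcpos hx hw ?_ ?_ (count - 0).toNat count 0 (le_refl 0) rfl []
        · intro r h0 hrl
          rw [hyeq]
          exact pvGetD_table _ _ _ rows.toNat r h0 (by omega)
        · intro r h0 hrl
          exact PySem.List.pyGetD_map_pyRange_of_nonneg _ rows r 0 h0 hrl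
      · -- rows < 0 : the row tables are never read (the loop breaks before any body runs)
        refine pvLoop_eq _ _ _ _ _ _ _ _ _ _ _ _ hcpos hx hw ?_ ?_ (count - 0).toNat count 0 (le_refl 0) rfl []
        · intro r h0 hrl; omega
        · intro r h0 hrl; omega
  · -- columns < 0 : Pre_ gives count ≤ 0 or rows < 0; both loops stop at idx = 0
      have hcneg : columns < 0 := by omega
      by_cases hcnt : count ≤ 0
      · rw [pvLoopA, pvLoopB, if_neg (by omega), if_neg (by omega)]
      · have hrneg : rows < 0 := by
          by_contra h
          exact hno ⟨hcneg, by omega, by omega⟩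
        rw [pvLoopA, pvLoopB, if_pos (by omega : (0:Int) < count), if_pos (by omega : (0:Int) < count)]
        simp only []
        rw [show PySem.Int.floordiv 0 columns = 0 by simp [PySem.Int.floordiv]]
        rw [if_pos (by omega : (0:Int) ≥ rows), if_pos (by omega : (0:Int) ≥ rows)]
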